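-- pv_equiv track=rewrite | github.com/eternaljoyy/PracticeProblems | Code_Signal/BookshelfTraversal.py | bookshelfTraversal
-- ===== SOURCE A (Python) =====
-- def bookshelfTraversal(bookshelves):
--
--     # TODO: Determine the number of rows and columns in 'bookshelves'
--     rows = len(bookshelves) - 1 # rows = 1
--     cols = len(bookshelves[0]) - 1  # cols = 3
--
--     direction = 'up'
--     traversal_path = []
--
--     while cols >= 0:
--         traversal_path.append(bookshelves[rows][cols]) # path = 8 4 3 7 6 2 1 5
--
--         if direction == 'up':
--             if rows > 0:
--                 rows -= 1
--             else:
--                 direction = 'down'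
--                 cols -=1
--         else:
--             if rows == len(bookshelves) - 1:
--                 direction = 'up'
--                 cols -= 1
--             else:
--                 rows += 1
--     return traversal_path
-- ===== SOURCE B (Python) =====
-- def bookshelfTraversal(bookshelves):
--     n = len(bookshelves)
--     result = []
--     up = True
--     for c in range(len(bookshelves[0]) - 1, -1, -1):
--         rows = range(n - 1, -1, -1) if up else range(n)
--         for r in rows:
--             result.append(bookshelves[r][c])
--         up = not up
--     return result
-- ===== Notes on version B (the rewrite author's own statement) =====
-- stated objective: simpler
-- what changed: A simulates the snake with a single while-loop over a mutable (row, col, direction) state machine taking one branch decision per cell; B decomposes it into a plain for-loop over columns right-to-left with an alternating row range per column.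
import Mathlib
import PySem

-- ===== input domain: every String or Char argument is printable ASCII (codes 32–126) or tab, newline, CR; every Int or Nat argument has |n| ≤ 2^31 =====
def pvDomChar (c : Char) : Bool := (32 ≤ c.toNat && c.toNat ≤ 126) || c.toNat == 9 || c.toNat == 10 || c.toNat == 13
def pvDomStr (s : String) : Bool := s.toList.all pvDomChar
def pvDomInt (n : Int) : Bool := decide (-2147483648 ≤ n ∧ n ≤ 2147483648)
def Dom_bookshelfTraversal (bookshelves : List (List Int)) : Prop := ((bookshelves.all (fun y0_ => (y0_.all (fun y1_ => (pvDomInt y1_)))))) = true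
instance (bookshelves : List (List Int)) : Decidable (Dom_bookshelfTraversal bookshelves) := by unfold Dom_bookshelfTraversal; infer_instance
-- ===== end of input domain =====

-- B replaces A's single while-loop state machine (mutable row/col/direction) by a for-loop over
-- columns right-to-left with an alternating row range per column (objective: simpler).

-- bookshelves[r][c] (both indices nonnegative and in range on every Pre_ input; default never read there)
def cell (shelves : List (List Int)) (r c : Int) : Int :=
  PySem.List.pyGetD ((PySem.List.pyGet? shelves r).getD []) c 0

-- ===== PORT A =====
-- A's while loop; fuel makes the recursion total, chosen ≥ the exact iteration count on every input.
def loopA (shelves : List (List Int)) (fuel : Nat) (rows cols : Int) (up : Bool)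
    (path : List Int) : List Int :=
  match fuel with
  | 0 => path
  | fuel + 1 =>
    if cols ≥ 0 then
      let path' := path ++ [cell shelves rows cols]
      if up then
        if rows > 0 then loopA shelves fuel (rows - 1) cols up path'
        else loopA shelves fuel rows (cols - 1) false path'
      else
        if rows = (shelves.length : Int) - 1 then loopA shelves fuel rows (cols - 1) true path'
        else loopA shelves fuel (rows + 1) cols up path'
    else path

def bookshelfTraversal (bookshelves : List (List Int)) : List Int :=
  let rows : Int := (bookshelves.length : Int) - 1
  let cols : Int := (((PySem.List.pyGet? bookshelves 0).getD []).length : Int) - 1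
  loopA bookshelves ((bookshelves.length + 2) * (((PySem.List.pyGet? bookshelves 0).getD []).length + 1))
    rows cols true []

-- ===== PORT B =====
-- one column's pass: rows last→0 when up, 0→last when down
def colPass (shelves : List (List Int)) (c : Int) (up : Bool) : List Int :=
  if up then
    (PySem.List.pyRange ((shelves.length : Int) - 1) (-1) (-1)).map (fun r => cell shelves r c)
  else
    (PySem.List.pyRange 0 (shelves.length : Int) 1).map (fun r => cell shelves r c)

-- B's outer for-loop: columns c, c-1, …, 0, flipping the direction each column
def goB (shelves : List (List Int)) (c : Int) (up : Bool) : List Int :=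
  if c ≥ 0 then colPass shelves c up ++ goB shelves (c - 1) (!up)
  else []
termination_by (c + 1).toNat
decreasing_by omega

def bookshelfTraversal_alt (bookshelves : List (List Int)) : List Int :=
  goB bookshelves ((((PySem.List.pyGet? bookshelves 0).getD []).length : Int) - 1) true

-- ===== PRECONDITION & SPEC =====
-- Pre_ excludes exactly the inputs on which Python A raises IndexError: the empty grid
-- (bookshelves[0] fails) and grids with some row shorter than row 0 (row[c] fails).
def Pre_bookshelfTraversal (bookshelves : List (List Int)) : Prop :=
  bookshelves ≠ [] ∧ ∀ row ∈ bookshelves, (bookshelves.headD []).length ≤ row.length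

instance (bookshelves : List (List Int)) : Decidable (Pre_bookshelfTraversal bookshelves) := by
  unfold Pre_bookshelfTraversal; infer_instance

def pvWitness_bookshelfTraversal : List (List Int) := [[1, 2, 3], [4, 5, 6]]

def Spec_bookshelfTraversal (bookshelves : List (List Int)) (out : List Int) : Prop :=
  out = bookshelfTraversal_alt bookshelves

instance (bookshelves : List (List Int)) (out : List Int) :
    Decidable (Spec_bookshelfTraversal bookshelves out) := by
  unfold Spec_bookshelfTraversal; infer_instance

-- ===== CLAIM =====
def Claim_equal_bookshelfTraversal : Prop :=
  ∀ (bookshelves : List (List Int)), Dom_bookshelfTraversal bookshelves →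
    Pre_bookshelfTraversal bookshelves →
    Spec_bookshelfTraversal bookshelves (bookshelfTraversal bookshelves)

-- ===== LEMMAS AND PROOFS =====

theorem loopA_neg (shelves : List (List Int)) (fuel : Nat) (rows : Int) (cols : Int) (up : Bool)
    (path : List Int) (h : ¬ cols ≥ 0) : loopA shelves fuel rows cols up path = path := by
  cases fuel <;> simp [loopA, h]

theorem loopA_step_up_pos (shelves : List (List Int)) (fuel : Nat) (rows cols : Int)
    (path : List Int) (hc : cols ≥ 0) (hr : rows > 0) :
    loopA shelves (fuel + 1) rows cols true path
      = loopA shelves fuel (rows - 1) cols true (path ++ [cell shelves rows cols]) := by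
  simp [loopA, hc, hr]

theorem loopA_step_up_zero (shelves : List (List Int)) (fuel : Nat) (rows cols : Int)
    (path : List Int) (hc : cols ≥ 0) (hr : ¬ rows > 0) :
    loopA shelves (fuel + 1) rows cols true path
      = loopA shelves fuel rows (cols - 1) false (path ++ [cell shelves rows cols]) := by
  simp [loopA, hc, hr]

theorem loopA_step_down_last (shelves : List (List Int)) (fuel : Nat) (rows cols : Int)
    (path : List Int) (hc : cols ≥ 0) (hr : rows = (shelves.length : Int) - 1) :
    loopA shelves (fuel + 1) rows cols false path
      = loopA shelves fuel rows (cols - 1) true (path ++ [cell shelves rows cols]) := by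
  simp [loopA, hc, hr]

theorem loopA_step_down (shelves : List (List Int)) (fuel : Nat) (rows cols : Int)
    (path : List Int) (hc : cols ≥ 0) (hr : ¬ rows = (shelves.length : Int) - 1) :
    loopA shelves (fuel + 1) rows cols false path
      = loopA shelves fuel (rows + 1) cols false (path ++ [cell shelves rows cols]) := by
  simp [loopA, hc, hr]

-- the upward pass: from row r the loop appends rows r, r-1, ..., 0, then flips to down and steps left
theorem loopA_up (shelves : List (List Int)) :
    ∀ (r : Nat) (c : Int) (path : List Int) (fuel : Nat), 0 ≤ c →
      loopA shelves (fuel + (r + 1)) (r : Int) c true path =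
        loopA shelves fuel 0 (c - 1) false
          (path ++ (PySem.List.pyRange (r : Int) (-1) (-1)).map (fun i => cell shelves i c)) := by
  intro r
  induction r with
  | zero =>
    intro c path fuel hc
    rw [show ((0:Nat):Int) = (0:Int) from rfl,
        PySem.List.pyRange_neg_one_cons (by omega : (-1 : Int) < 0),
        PySem.List.pyRange_neg_one_eq_nil (by omega : (0 : Int) - 1 ≤ -1),
        loopA_step_up_zero shelves fuel 0 c path hc (by omega)]
    simp
  | succ r ih =>
    intro c path fuel hc
    rw [PySem.List.pyRange_neg_one_cons (by omega : (-1 : Int) < ((r + 1 : Nat) : Int)),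
        show fuel + (r + 1 + 1) = (fuel + (r + 1)) + 1 from rfl,
        loopA_step_up_pos shelves _ _ c path hc (by omega : ((r + 1 : Nat) : Int) > 0),
        show ((r + 1 : Nat) : Int) - 1 = (r : Int) by omega,
        ih c _ fuel hc]
    simp

-- the downward pass: from row (n-1-k) the loop appends rows n-1-k, ..., n-1, then flips to up
theorem loopA_down (shelves : List (List Int)) :
    ∀ (k : Nat) (c : Int) (path : List Int) (fuel : Nat), 0 ≤ c → (k : Int) ≤ (shelves.length : Int) - 1 →
      loopA shelves (fuel + (k + 1)) ((shelves.length : Int) - 1 - (k : Int)) c false path =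
        loopA shelves fuel ((shelves.length : Int) - 1) (c - 1) true
          (path ++ (PySem.List.pyRange ((shelves.length : Int) - 1 - (k : Int))
              ((shelves.length : Int)) 1).map (fun i => cell shelves i c)) := by
  intro k
  induction k with
  | zero =>
    intro c path fuel hc hk
    rw [show (shelves.length : Int) - 1 - ((0:Nat):Int) = (shelves.length : Int) - 1 by omega,
        PySem.List.pyRange_one_cons (by omega : (shelves.length : Int) - 1 < (shelves.length : Int)),
        PySem.List.pyRange_one_eq_nil (by omega : (shelves.length : Int) ≤ (shelves.length : Int) - 1 + 1),
        loopA_step_down_last shelves fuel _ c path hc rfl]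
    simp
  | succ k ih =>
    intro c path fuel hc hk
    rw [PySem.List.pyRange_one_cons
        (by omega : (shelves.length : Int) - 1 - ((k + 1 : Nat) : Int) < (shelves.length : Int)),
        show fuel + (k + 1 + 1) = (fuel + (k + 1)) + 1 from rfl,
        loopA_step_down shelves _ _ c path hc (by omega),
        show (shelves.length : Int) - 1 - ((k + 1 : Nat) : Int) + 1
          = (shelves.length : Int) - 1 - (k : Int) by omega,
        ih c _ fuel hc (by omega)]
    rw [show (shelves.length : Int) - 1 - (k : Int)
          = (shelves.length : Int) - 1 - ((k + 1 : Nat) : Int) + 1 by omega]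
    simp

theorem goB_neg (shelves : List (List Int)) (c : Int) (up : Bool) (h : ¬ c ≥ 0) :
    goB shelves c up = [] := by
  rw [goB]; simp [h]

theorem goB_pos (shelves : List (List Int)) (c : Int) (up : Bool) (h : c ≥ 0) :
    goB shelves c up = colPass shelves c up ++ goB shelves (c - 1) (!up) := by
  rw [goB]; simp [h]

-- the main invariant: with enough fuel, A's loop starting a fresh column equals B's per-column build
theorem loopA_eq_goB (shelves : List (List Int)) (hn : 1 ≤ shelves.length) :
    ∀ (cn : Nat) (up : Bool) (path : List Int) (fuel : Nat),
      loopA shelves (fuel + (cn + 1) * shelves.length)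
        (if up then (shelves.length : Int) - 1 else 0) (cn : Int) up path =
      path ++ goB shelves (cn : Int) up := by
  intro cn
  induction cn with
  | zero =>
    intro up path fuel
    have hc : ((0 : Nat) : Int) ≥ 0 := by omega
    have hx : fuel + (0 + 1) * shelves.length
        = fuel + ((shelves.length - 1) + 1) := by
      simp only [Nat.zero_add, Nat.one_mul]; omega
    have hcast : (shelves.length : Int) - 1 = ((shelves.length - 1 : Nat) : Int) := by omega
    cases up with
    | true =>
      rw [if_pos rfl, hx, hcast, loopA_up shelves (shelves.length - 1) _ path _ hc,
          loopA_neg _ _ _ _ _ _ (by omega), goB_pos _ _ _ hc, goB_neg _ _ _ (by omega)]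
      simp [colPass, hcast]
    | false =>
      rw [if_neg (by simp), hx,
          show (0 : Int) = (shelves.length : Int) - 1 - ((shelves.length - 1 : Nat) : Int) by omega,
          loopA_down shelves (shelves.length - 1) _ path _ hc (by omega),
          loopA_neg _ _ _ _ _ _ (by omega), goB_pos _ _ _ hc, goB_neg _ _ _ (by omega)]
      simp [colPass]
      rw [show (shelves.length : Int) - 1 - ((shelves.length - 1 : Nat) : Int) = (0 : Int) by omega]
  | succ cn ih =>
    intro cn_up path fuel
    have hc : ((cn + 1 : Nat) : Int) ≥ 0 := by omega
    have hx : fuel + (cn + 1 + 1) * shelves.length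
        = (fuel + (cn + 1) * shelves.length) + ((shelves.length - 1) + 1) := by
      have h1 := Nat.add_mul (cn + 1) 1 shelves.length
      have h2 := Nat.one_mul shelves.length
      omega
    have hcast : (shelves.length : Int) - 1 = ((shelves.length - 1 : Nat) : Int) := by omega
    have hcol : ((cn + 1 : Nat) : Int) - 1 = (cn : Int) := by omega
    cases cn_up with
    | true =>
      rw [if_pos rfl, hx, hcast, loopA_up shelves (shelves.length - 1) _ path _ hc, hcol]
      have h2 := ih false (path ++ (PySem.List.pyRange ((shelves.length - 1 : Nat) : Int) (-1) (-1)).map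
        (fun i => cell shelves i ((cn + 1 : Nat) : Int))) fuel
      rw [if_neg (by simp)] at h2
      rw [h2, goB_pos _ _ _ hc, hcol]
      simp [colPass, hcast]
    | false =>
      rw [if_neg (by simp), hx,
          show (0 : Int) = (shelves.length : Int) - 1 - ((shelves.length - 1 : Nat) : Int) by omega,
          loopA_down shelves (shelves.length - 1) _ path _ hc (by omega), hcol]
      have h2 := ih true (path ++ (PySem.List.pyRange ((shelves.length : Int) - 1 - ((shelves.length - 1 : Nat) : Int))
          ((shelves.length : Int)) 1).map (fun i => cell shelves i ((cn + 1 : Nat) : Int))) fuel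
      rw [if_pos rfl] at h2
      rw [h2, goB_pos _ _ _ hc, hcol]
      simp [colPass]
      rw [show (shelves.length : Int) - 1 - ((shelves.length - 1 : Nat) : Int) = (0 : Int) by omega]

-- ===== VERDICT =====
theorem bookshelfTraversal_spec : Claim_equal_bookshelfTraversal := by
  intro shelves _ hpre
  have hn : 1 ≤ shelves.length := List.length_pos_of_ne_nil hpre.1
  unfold Spec_bookshelfTraversal bookshelfTraversal bookshelfTraversal_alt
  set m := (((PySem.List.pyGet? shelves 0).getD []).length) with hm
  clear_value m
  rcases Nat.eq_zero_or_pos m with h0 | hpos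
  · rw [loopA_neg _ _ _ _ _ _ (by omega), goB_neg _ _ _ (by omega)]
  · have hcast : (m : Int) - 1 = ((m - 1 : Nat) : Int) := by omega
    have hfuel : (shelves.length + 2) * (m + 1)
        = (shelves.length + 2 * m + 2) + ((m - 1) + 1) * shelves.length := by
      obtain ⟨m', rfl⟩ : ∃ m', m = m' + 1 := ⟨m - 1, by omega⟩
      simp only [Nat.add_sub_cancel]
      ring
    rw [hcast, hfuel]
    have h2 := loopA_eq_goB shelves hn (m - 1) true [] (shelves.length + 2 * m + 2)
    rw [if_pos rfl] at h2
    rw [h2]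
    simp
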